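-- pv_equiv track=rewrite | github.com/dishahebbar/Aurora-2.0 | ui/app.py | categorize_images
-- ===== SOURCE A (Python) =====
-- def categorize_images(images):
--     """Intelligently categorize images into logical groups"""
--     categories = {
--         "spatial": [],
--         "progress": [],
--         "area_analysis": [],
--         "growth_metrics": [],
--         "no_go_violations": [],
--         "other": []
--     }
--
--     for img in images:
--         img_lower = img.lower()
--
--         if "spatialmap" in img_lower or "percent" in img_lower:
--             categories["spatial"].append(img)
--         elif "progress" in img_lower:
--             categories["progress"].append(img)
--         elif "no_go" in img_lower:
--             categories["no_go_violations"].append(img)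
--         elif any(x in img_lower for x in ["areavstime", "candidatearea", "comparision"]):
--             categories["area_analysis"].append(img)
--         elif any(x in img_lower for x in ["normalized", "growthrate", "firstseen"]):
--             categories["growth_metrics"].append(img)
--         else:
--             categories["other"].append(img)
--
--     return categories
-- ===== SOURCE B (Python) =====
-- def categorize_images(images):
--     """Staged sieve: repeatedly split the remaining pool by each category's
--     keywords, in priority order; what survives every sieve is 'other'."""
--     def take(kws, pool):
--         match = lambda img: any(k in img.lower() for k in kws)
--         return [i for i in pool if match(i)], [i for i in pool if not match(i)]
--
--     spatial, rest = take(["spatialmap", "percent"], images)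
--     progress, rest = take(["progress"], rest)
--     no_go, rest = take(["no_go"], rest)
--     area, rest = take(["areavstime", "candidatearea", "comparision"], rest)
--     growth, rest = take(["normalized", "growthrate", "firstseen"], rest)
--     return {
--         "spatial": spatial,
--         "progress": progress,
--         "area_analysis": area,
--         "growth_metrics": growth,
--         "no_go_violations": no_go,
--         "other": rest,
--     }
-- ===== Notes on version B (the rewrite author's own statement) =====
-- stated objective: alternative
-- what changed: Replaces the single pass with a per-image if/elif chain and a mutated dict by five staged partition passes: each category's matches are sieved out of the shrinking remainder in priority order, and the final dict is built at once from the six resulting lists.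
import Mathlib
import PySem

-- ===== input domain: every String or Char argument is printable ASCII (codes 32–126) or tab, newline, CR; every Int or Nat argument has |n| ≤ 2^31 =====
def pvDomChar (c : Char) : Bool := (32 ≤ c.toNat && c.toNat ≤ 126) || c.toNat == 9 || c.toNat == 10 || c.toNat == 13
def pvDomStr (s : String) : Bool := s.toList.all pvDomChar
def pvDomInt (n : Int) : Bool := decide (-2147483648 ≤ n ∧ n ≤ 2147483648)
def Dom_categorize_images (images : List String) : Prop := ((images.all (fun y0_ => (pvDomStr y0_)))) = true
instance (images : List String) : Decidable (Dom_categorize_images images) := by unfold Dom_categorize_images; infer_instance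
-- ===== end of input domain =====

-- B replaces A's per-image if/elif chain over a mutated dict by five staged
-- partition passes over a shrinking pool (objective: alternative).

-- ===== PORT A =====
def categorize_images (images : List String) : List (String × List String) :=
  let categories : PySem.Dict String (List String) :=
    ((((((PySem.Dict.empty.insert "spatial" []).insert "progress" []).insert
        "area_analysis" []).insert "growth_metrics" []).insert
        "no_go_violations" []).insert "other" [])
  (images.foldl (fun cats img =>
    let img_lower := PySem.Str.lower img
    if PySem.Str.isIn "spatialmap" img_lower || PySem.Str.isIn "percent" img_lower then
      cats.modify "spatial" [] (· ++ [img])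
    else if PySem.Str.isIn "progress" img_lower then
      cats.modify "progress" [] (· ++ [img])
    else if PySem.Str.isIn "no_go" img_lower then
      cats.modify "no_go_violations" [] (· ++ [img])
    else if ["areavstime", "candidatearea", "comparision"].any
        (fun x => PySem.Str.isIn x img_lower) then
      cats.modify "area_analysis" [] (· ++ [img])
    else if ["normalized", "growthrate", "firstseen"].any
        (fun x => PySem.Str.isIn x img_lower) then
      cats.modify "growth_metrics" [] (· ++ [img])
    else
      cats.modify "other" [] (· ++ [img])) categories).items

-- ===== PORT B =====
-- take(kws, pool): split pool into (matching, non-matching)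
def pvTake (kws : List String) (pool : List String) : List String × List String :=
  let match_ := fun img => kws.any (fun k => PySem.Str.isIn k (PySem.Str.lower img))
  (pool.filter (fun i => match_ i), pool.filter (fun i => !match_ i))

def categorize_images_alt (images : List String) : List (String × List String) :=
  let (spatial, rest0) := pvTake ["spatialmap", "percent"] images
  let (progress, rest1) := pvTake ["progress"] rest0
  let (no_go, rest2) := pvTake ["no_go"] rest1
  let (area, rest3) := pvTake ["areavstime", "candidatearea", "comparision"] rest2
  let (growth, rest4) := pvTake ["normalized", "growthrate", "firstseen"] rest3
  [("spatial", spatial), ("progress", progress), ("area_analysis", area),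
   ("growth_metrics", growth), ("no_go_violations", no_go), ("other", rest4)]

-- ===== PRECONDITION & SPEC =====
def Spec_categorize_images (images : List String) (out : List (String × List String)) : Prop := out = categorize_images_alt images
instance (images : List String) (out : List (String × List String)) : Decidable (Spec_categorize_images images out) := by unfold Spec_categorize_images; infer_instance

-- ===== CLAIM (what is proved, stated in full; the proofs are below) =====
def Claim_equal_categorize_images : Prop := ∀ (images : List String), Dom_categorize_images images → Spec_categorize_images images (categorize_images images)

-- ===== LEMMAS AND PROOFS =====

-- the five keyword conditions, as A's chain tests them on one image
def pvB1 (i : String) : Bool :=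
  PySem.Str.isIn "spatialmap" (PySem.Str.lower i) || PySem.Str.isIn "percent" (PySem.Str.lower i)
def pvB2 (i : String) : Bool := PySem.Str.isIn "progress" (PySem.Str.lower i)
def pvB3 (i : String) : Bool := PySem.Str.isIn "no_go" (PySem.Str.lower i)
def pvB4 (i : String) : Bool :=
  PySem.Str.isIn "areavstime" (PySem.Str.lower i) ||
    (PySem.Str.isIn "candidatearea" (PySem.Str.lower i) ||
      PySem.Str.isIn "comparision" (PySem.Str.lower i))
def pvB5 (i : String) : Bool :=
  PySem.Str.isIn "normalized" (PySem.Str.lower i) ||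
    (PySem.Str.isIn "growthrate" (PySem.Str.lower i) ||
      PySem.Str.isIn "firstseen" (PySem.Str.lower i))

-- the category A's if/elif chain assigns to one image
def pvCatA (i : String) : String :=
  if pvB1 i then "spatial"
  else if pvB2 i then "progress"
  else if pvB3 i then "no_go_violations"
  else if pvB4 i then "area_analysis"
  else if pvB5 i then "growth_metrics"
  else "other"

def pvK6 : List String :=
  ["spatial", "progress", "area_analysis", "growth_metrics", "no_go_violations", "other"]

def pvD0 : PySem.Dict String (List String) :=
  ((((((PySem.Dict.empty.insert "spatial" []).insert "progress" []).insert
      "area_analysis" []).insert "growth_metrics" []).insert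
      "no_go_violations" []).insert "other" [])

theorem pv_stepA_fun :
    (fun (cats : PySem.Dict String (List String)) (img : String) =>
      let img_lower := PySem.Str.lower img
      if PySem.Str.isIn "spatialmap" img_lower || PySem.Str.isIn "percent" img_lower then
        cats.modify "spatial" [] (· ++ [img])
      else if PySem.Str.isIn "progress" img_lower then
        cats.modify "progress" [] (· ++ [img])
      else if PySem.Str.isIn "no_go" img_lower then
        cats.modify "no_go_violations" [] (· ++ [img])
      else if ["areavstime", "candidatearea", "comparision"].any
          (fun x => PySem.Str.isIn x img_lower) then
        cats.modify "area_analysis" [] (· ++ [img])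
      else if ["normalized", "growthrate", "firstseen"].any
          (fun x => PySem.Str.isIn x img_lower) then
        cats.modify "growth_metrics" [] (· ++ [img])
      else
        cats.modify "other" [] (· ++ [img])) =
    (fun cats img => cats.modify (pvCatA img) [] (· ++ [img])) := by
  funext cats img
  simp only [pvCatA, pvB1, pvB2, pvB3, pvB4, pvB5, List.any_cons, List.any_nil, Bool.or_false]
  split_ifs <;> rfl

theorem pv_A_eq (images : List String) :
    categorize_images images =
      (images.foldl (fun d i => d.modify (pvCatA i) [] (· ++ [i])) pvD0).items := by
  unfold categorize_images
  simp only [pv_stepA_fun]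
  rfl

theorem pv_getD (l : List String) (d : PySem.Dict String (List String)) (c : String) :
    (l.foldl (fun d i => d.modify (pvCatA i) [] (· ++ [i])) d).getD c []
      = d.getD c [] ++ l.filter (fun i => pvCatA i == c) := by
  induction l generalizing d with
  | nil => simp
  | cons i l ih =>
    rw [List.foldl_cons, ih, List.filter_cons]
    by_cases h : pvCatA i = c
    · simp [h]
    · have h' : ¬ (c = pvCatA i) := fun e => h e.symm
      simp [PySem.Dict.getD_modify, h, h']

theorem pv_mem (i : String) : pvCatA i ∈ pvK6 := by
  unfold pvCatA pvK6; split_ifs <;> simp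

theorem pv_update (l : List String) :
    PySem.Set.update pvK6 (l.map pvCatA) = pvK6 := by
  induction l with
  | nil => rfl
  | cons i l ih =>
    show PySem.Set.update (PySem.Set.add pvK6 (pvCatA i)) (l.map pvCatA) = pvK6
    rw [show PySem.Set.add pvK6 (pvCatA i) = pvK6 from by
      simp [PySem.Set.add, PySem.Set.contains, pv_mem i]]
    exact ih

theorem pv_keys (images : List String) :
    (images.foldl (fun d i => d.modify (pvCatA i) [] (· ++ [i])) pvD0).keys = pvK6 := by
  have h := PySem.Dict.keys_foldl_modify_key images pvCatA [] (fun _ i => (· ++ [i])) pvD0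
  simp only [] at h
  rw [h, show pvD0.keys = pvK6 from rfl, pv_update]

theorem pv_alt_eq (images : List String) :
    categorize_images_alt images =
      [("spatial", images.filter (fun i => pvB1 i)),
       ("progress", (images.filter (fun i => !pvB1 i)).filter (fun i => pvB2 i)),
       ("area_analysis",
         (((images.filter (fun i => !pvB1 i)).filter (fun i => !pvB2 i)).filter
            (fun i => !pvB3 i)).filter (fun i => pvB4 i)),
       ("growth_metrics",
         ((((images.filter (fun i => !pvB1 i)).filter (fun i => !pvB2 i)).filter
            (fun i => !pvB3 i)).filter (fun i => !pvB4 i)).filter (fun i => pvB5 i)),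
       ("no_go_violations",
         ((images.filter (fun i => !pvB1 i)).filter (fun i => !pvB2 i)).filter
            (fun i => pvB3 i)),
       ("other",
         ((((images.filter (fun i => !pvB1 i)).filter (fun i => !pvB2 i)).filter
            (fun i => !pvB3 i)).filter (fun i => !pvB4 i)).filter (fun i => !pvB5 i))] := by
  simp only [categorize_images_alt, pvTake, pvB1, pvB2, pvB3, pvB4, pvB5,
    List.any_cons, List.any_nil, Bool.or_false]

theorem categorize_images_spec' (images : List String) :
    categorize_images images = categorize_images_alt images := by
  rw [pv_A_eq,
    PySem.Dict.items_eq_map_keys _ (by rw [pv_keys]; decide) [],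
    pv_keys, pv_alt_eq]
  simp only [pvK6, List.map_cons, List.map_nil, pv_getD,
    show pvD0.getD "spatial" [] = [] from rfl,
    show pvD0.getD "progress" [] = [] from rfl,
    show pvD0.getD "area_analysis" [] = [] from rfl,
    show pvD0.getD "growth_metrics" [] = [] from rfl,
    show pvD0.getD "no_go_violations" [] = [] from rfl,
    show pvD0.getD "other" [] = [] from rfl,
    List.nil_append, List.filter_filter, List.cons.injEq, Prod.mk.injEq,
    true_and, and_true]
  refine ⟨?_, ?_, ?_, ?_, ?_, ?_⟩ <;>
    refine List.filter_congr fun i _ => ?_ <;>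
    cases h1 : pvB1 i <;> cases h2 : pvB2 i <;> cases h3 : pvB3 i <;>
      cases h4 : pvB4 i <;> cases h5 : pvB5 i <;>
    simp [pvCatA, h1, h2, h3, h4, h5]

-- ===== VERDICT (by name: the statement is the Claim_ definition above) =====
theorem categorize_images_spec : Claim_equal_categorize_images := by
  intro images _
  exact categorize_images_spec' images
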